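-- pv_equiv track=rewrite | github.com/seohyeonbin38/Coding_test | 코딩마스터스/유사 소수 분할.py | can_be_partitioned
-- ===== SOURCE A (Python) =====
-- def can_be_partitioned(n, pseudo_primes):
--     pseudo_primes_set = set(pseudo_primes)
--
--     for i in range(1, n):
--         for j in range(i + 1, n):
--             for k in range(j + 1, n):
--                 l = n - i - j - k
--                 if l > k:
--                     count = sum([num in pseudo_primes_set for num in [i, j, k, l]])
--                     if count >= 3:
--                         return True
--     return False
-- ===== SOURCE B (Python) =====
-- def can_be_partitioned(n, pseudo_primes):
--     # Search directly over triples of distinct positive pseudo-primes p < q < r;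
--     # the fourth part x = n - p - q - r just has to be positive and distinct.
--     P = sorted({v for v in pseudo_primes if v >= 1})
--     return _search3(n, P)
--
--
-- def _search3(n, P):
--     if not P:
--         return False
--     p, rest = P[0], P[1:]
--     return _search2(n, p, rest) or _search3(n, rest)
--
--
-- def _search2(n, p, P):
--     if not P:
--         return False
--     q, rest = P[0], P[1:]
--     return _search1(n, p, q, rest) or _search2(n, p, rest)
--
--
-- def _search1(n, p, q, P):
--     for r in P:
--         x = n - p - q - r
--         if x >= 1 and x != p and x != q and x != r:
--             return True
--     return False
-- ===== Notes on version B (the rewrite author's own statement) =====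
-- stated objective: faster
-- what changed: Instead of scanning all integer triples i<j<k below n and counting set hits, B enumerates triples p<q<r of distinct positive pseudo-primes (sorted deduplicated list) and checks that the fourth part n-p-q-r is positive and distinct from them.
import Mathlib
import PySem

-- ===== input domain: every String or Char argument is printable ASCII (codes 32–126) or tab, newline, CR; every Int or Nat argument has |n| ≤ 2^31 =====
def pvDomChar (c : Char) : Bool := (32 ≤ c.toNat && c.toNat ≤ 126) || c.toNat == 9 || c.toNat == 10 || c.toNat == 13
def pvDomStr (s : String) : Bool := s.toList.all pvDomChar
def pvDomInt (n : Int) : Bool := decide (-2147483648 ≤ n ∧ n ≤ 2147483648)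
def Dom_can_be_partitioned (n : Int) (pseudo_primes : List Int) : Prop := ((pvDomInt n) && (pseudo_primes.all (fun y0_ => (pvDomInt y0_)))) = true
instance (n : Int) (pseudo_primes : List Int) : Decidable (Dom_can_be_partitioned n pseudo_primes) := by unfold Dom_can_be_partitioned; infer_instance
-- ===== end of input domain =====

-- B searches triples of distinct positive pseudo-primes instead of A's cubic scan
-- over all integer triples below n (objective: faster when the pseudo-prime list is
-- small relative to n).

-- ===== PORT A =====
def can_be_partitioned (n : Int) (pseudo_primes : List Int) : Bool :=
  let S := PySem.Set.ofList pseudo_primes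
  (PySem.List.pyRange 1 n 1).any fun i =>
    (PySem.List.pyRange (i+1) n 1).any fun j =>
      (PySem.List.pyRange (j+1) n 1).any fun k =>
        let l := n - i - j - k
        if l > k then
          decide (3 ≤ (([i, j, k, l]).map (fun num => if PySem.Set.contains S num then (1 : Int) else 0)).sum)
        else false

-- ===== PORT B =====
-- helper _search1: scan for a third pseudo-prime r making a valid fourth part
def search1 (n p q : Int) (P : List Int) : Bool :=
  P.any fun r =>
    let x := n - p - q - r
    decide (1 ≤ x ∧ x ≠ p ∧ x ≠ q ∧ x ≠ r)

-- helper _search2: pick the middle pseudo-prime q from the tail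
def search2 (n p : Int) : List Int → Bool
  | [] => false
  | q :: rest => search1 n p q rest || search2 n p rest

-- helper _search3: pick the smallest pseudo-prime p
def search3 (n : Int) : List Int → Bool
  | [] => false
  | p :: rest => search2 n p rest || search3 n rest

def can_be_partitioned_alt (n : Int) (pseudo_primes : List Int) : Bool :=
  let P := PySem.List.sorted (PySem.Set.ofList (pseudo_primes.filter (fun v => decide (1 ≤ v)))) (fun x => x) false
  search3 n P

-- ===== PRECONDITION & SPEC =====
def Spec_can_be_partitioned (n : Int) (pseudo_primes : List Int) (out : Bool) : Prop := out = can_be_partitioned_alt n pseudo_primes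
instance (n : Int) (pseudo_primes : List Int) (out : Bool) : Decidable (Spec_can_be_partitioned n pseudo_primes out) := by unfold Spec_can_be_partitioned; infer_instance

-- ===== CLAIM (what is proved, stated in full; the proofs are below) =====
def Claim_equal_can_be_partitioned : Prop := ∀ (n : Int) (pseudo_primes : List Int), Dom_can_be_partitioned n pseudo_primes → Spec_can_be_partitioned n pseudo_primes (can_be_partitioned n pseudo_primes)

-- ===== LEMMAS AND PROOFS =====

-- the common condition on a triple of pseudo-primes
def good (n p q r : Int) : Prop :=
  1 ≤ n - p - q - r ∧ n - p - q - r ≠ p ∧ n - p - q - r ≠ q ∧ n - p - q - r ≠ r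

theorem search1_iff (n p q : Int) (P : List Int) :
    search1 n p q P = true ↔ ∃ r ∈ P, good n p q r := by
  simp [search1, good, List.any_eq_true]

theorem search2_iff (n p : Int) (P : List Int) (hs : P.Pairwise (· < ·)) :
    search2 n p P = true ↔ ∃ q ∈ P, ∃ r ∈ P, q < r ∧ good n p q r := by
  induction P with
  | nil => simp [search2]
  | cons q0 rest ih =>
    rcases List.pairwise_cons.mp hs with ⟨hlt, hrest⟩
    constructor
    · intro h
      rcases Bool.or_eq_true .. |>.mp (by simpa [search2] using h) with h1 | h2
      · rcases (search1_iff n p q0 rest).mp h1 with ⟨r, hr, hg⟩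
        exact ⟨q0, List.mem_cons_self .., r, List.mem_cons_of_mem _ hr, hlt r hr, hg⟩
      · rcases (ih hrest).mp h2 with ⟨q, hq, r, hr, hqr, hg⟩
        exact ⟨q, List.mem_cons_of_mem _ hq, r, List.mem_cons_of_mem _ hr, hqr, hg⟩
    · rintro ⟨q, hq, r, hr, hqr, hg⟩
      rcases List.mem_cons.mp hq with rfl | hq'
      · have hr' : r ∈ rest := by
          rcases List.mem_cons.mp hr with rfl | h
          · exact absurd hqr (lt_irrefl _)
          · exact h
        have : search1 n p q rest = true := (search1_iff n p q rest).mpr ⟨r, hr', hg⟩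
        simp [search2, this]
      · have hr' : r ∈ rest := by
          rcases List.mem_cons.mp hr with rfl | h
          · exact absurd (lt_trans (hlt q hq') hqr) (lt_irrefl _)
          · exact h
        have : search2 n p rest = true := (ih hrest).mpr ⟨q, hq', r, hr', hqr, hg⟩
        simp [search2, this]

theorem search3_iff (n : Int) (P : List Int) (hs : P.Pairwise (· < ·)) :
    search3 n P = true ↔ ∃ p ∈ P, ∃ q ∈ P, ∃ r ∈ P, p < q ∧ q < r ∧ good n p q r := by
  induction P with
  | nil => simp [search3]
  | cons p0 rest ih =>
    rcases List.pairwise_cons.mp hs with ⟨hlt, hrest⟩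
    constructor
    · intro h
      rcases Bool.or_eq_true .. |>.mp (by simpa [search3] using h) with h1 | h2
      · rcases (search2_iff n p0 rest hrest).mp h1 with ⟨q, hq, r, hr, hqr, hg⟩
        exact ⟨p0, List.mem_cons_self .., q, List.mem_cons_of_mem _ hq,
               r, List.mem_cons_of_mem _ hr, hlt q hq, hqr, hg⟩
      · rcases (ih hrest).mp h2 with ⟨p, hp, q, hq, r, hr, h1, h2', hg⟩
        exact ⟨p, List.mem_cons_of_mem _ hp, q, List.mem_cons_of_mem _ hq,
               r, List.mem_cons_of_mem _ hr, h1, h2', hg⟩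
    · rintro ⟨p, hp, q, hq, r, hr, hpq, hqr, hg⟩
      rcases List.mem_cons.mp hp with rfl | hp'
      · have hq' : q ∈ rest := by
          rcases List.mem_cons.mp hq with rfl | h
          · exact absurd hpq (lt_irrefl _)
          · exact h
        have hr' : r ∈ rest := by
          rcases List.mem_cons.mp hr with rfl | h
          · exact absurd (lt_trans hpq hqr) (lt_irrefl _)
          · exact h
        have : search2 n p rest = true := (search2_iff n p rest hrest).mpr ⟨q, hq', r, hr', hqr, hg⟩
        simp [search3, this]
      · have hq' : q ∈ rest := by
          rcases List.mem_cons.mp hq with rfl | h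
          · exact absurd (lt_trans (hlt p hp') hpq) (lt_irrefl _)
          · exact h
        have hr' : r ∈ rest := by
          rcases List.mem_cons.mp hr with rfl | h
          · exact absurd (lt_trans (lt_trans (hlt p hp') hpq) hqr) (lt_irrefl _)
          · exact h
        have : search3 n rest = true := (ih hrest).mpr ⟨p, hp', q, hq', r, hr', hpq, hqr, hg⟩
        simp [search3, this]


theorem portA_iff (n : Int) (ps : List Int) :
    can_be_partitioned n ps = true ↔ ∃ i j k : Int,
      1 ≤ i ∧ i < n ∧ i + 1 ≤ j ∧ j < n ∧ j + 1 ≤ k ∧ k < n ∧ k < n - i - j - k ∧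
      3 ≤ ((if i ∈ ps then (1:Int) else 0) + (if j ∈ ps then (1:Int) else 0) +
           (if k ∈ ps then (1:Int) else 0) + (if n - i - j - k ∈ ps then (1:Int) else 0)) := by
  simp [can_be_partitioned, List.any_eq_true, PySem.List.mem_pyRange_one,
        PySem.Set.contains, PySem.Set.mem_ofList]
  constructor
  · rintro ⟨i, ⟨hi1, hi2⟩, j, ⟨hij, hj2⟩, k, ⟨hjk, hk2⟩, hlk, hcnt⟩
    exact ⟨i, hi1, hi2, j, by omega, hj2, k, by omega, hk2, hlk, by omega⟩
  · rintro ⟨i, hi1, hi2, j, hj1, hj2, k, hk1, hk2, hlk, hcnt⟩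
    exact ⟨i, ⟨hi1, hi2⟩, j, ⟨by omega, hj2⟩, k, ⟨by omega, hk2⟩, hlk, by omega⟩

theorem memP_iff (ps : List Int) (x : Int) :
    x ∈ PySem.List.sorted (PySem.Set.ofList (ps.filter (fun v => decide (1 ≤ v)))) (fun x => x) false
      ↔ x ∈ ps ∧ 1 ≤ x := by
  simp [PySem.List.mem_sorted, PySem.Set.mem_ofList, List.mem_filter]

theorem portB_iff (n : Int) (ps : List Int) :
    can_be_partitioned_alt n ps = true ↔ ∃ p q r : Int,
      p ∈ ps ∧ 1 ≤ p ∧ q ∈ ps ∧ 1 ≤ q ∧ r ∈ ps ∧ 1 ≤ r ∧ p < q ∧ q < r ∧ good n p q r := by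
  unfold can_be_partitioned_alt
  rw [search3_iff _ _ (PySem.List.sorted_ofList_pairwise_lt ..)]
  constructor
  · rintro ⟨p, hp, q, hq, r, hr, h1, h2, hg⟩
    rw [memP_iff] at hp hq hr
    exact ⟨p, q, r, hp.1, hp.2, hq.1, hq.2, hr.1, hr.2, h1, h2, hg⟩
  · rintro ⟨p, q, r, hp1, hp2, hq1, hq2, hr1, hr2, h1, h2, hg⟩
    exact ⟨p, (memP_iff ps p).mpr ⟨hp1, hp2⟩, q, (memP_iff ps q).mpr ⟨hq1, hq2⟩,
           r, (memP_iff ps r).mpr ⟨hr1, hr2⟩, h1, h2, hg⟩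

-- from a 0/1-sum of four indicators being at least 3, at least three of them hold
theorem three_of_four {a b c d : Prop} [Decidable a] [Decidable b] [Decidable c] [Decidable d]
    (h : 3 ≤ ((if a then (1:Int) else 0) + (if b then (1:Int) else 0) +
              (if c then (1:Int) else 0) + (if d then (1:Int) else 0))) :
    (b ∧ c ∧ d) ∨ (a ∧ c ∧ d) ∨ (a ∧ b ∧ d) ∨ (a ∧ b ∧ c) := by
  by_cases ha : a <;> by_cases hb : b <;> by_cases hc : c <;> by_cases hd : d <;>
    simp [ha, hb, hc, hd] at h ⊢

-- ===== VERDICT (by name: the statement is the Claim_ definition above) =====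
theorem can_be_partitioned_spec : Claim_equal_can_be_partitioned := by
  intro n ps _
  unfold Spec_can_be_partitioned
  rw [Bool.eq_iff_iff, portA_iff, portB_iff]
  constructor
  · rintro ⟨i, j, k, hi1, hi2, hj1, hj2, hk1, hk2, hlk, hcnt⟩
    rcases three_of_four hcnt with ⟨hb, hc, hd⟩ | ⟨ha, hc, hd⟩ | ⟨ha, hb, hd⟩ | ⟨ha, hb, hc⟩
    · exact ⟨j, k, n - i - j - k, hb, by omega, hc, by omega, hd, by omega, by omega, by omega,
             by simp only [good]; omega⟩
    · exact ⟨i, k, n - i - j - k, ha, hi1, hc, by omega, hd, by omega, by omega, by omega,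
             by simp only [good]; omega⟩
    · exact ⟨i, j, n - i - j - k, ha, hi1, hb, by omega, hd, by omega, by omega, by omega,
             by simp only [good]; omega⟩
    · exact ⟨i, j, k, ha, hi1, hb, by omega, hc, by omega, by omega, by omega,
             by simp only [good]; omega⟩
  · rintro ⟨p, q, r, hp1, hp2, hq1, hq2, hr1, hr2, hpq, hqr, hg⟩
    simp only [good] at hg
    rcases (by omega : n - p - q - r < p ∨ (p < n - p - q - r ∧ n - p - q - r < q) ∨
            (q < n - p - q - r ∧ n - p - q - r < r) ∨ r < n - p - q - r) with hx | hx | hx | hx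
    · refine ⟨n - p - q - r, p, q, by omega, by omega, by omega, by omega, by omega, by omega,
             by omega, ?_⟩
      have e : n - (n - p - q - r) - p - q = r := by ring
      rw [e]
      simp only [if_pos hp1, if_pos hq1, if_pos hr1]
      split_ifs <;> omega
    · refine ⟨p, n - p - q - r, q, by omega, by omega, by omega, by omega, by omega, by omega,
             by omega, ?_⟩
      have e : n - p - (n - p - q - r) - q = r := by ring
      rw [e]
      simp only [if_pos hp1, if_pos hq1, if_pos hr1]
      split_ifs <;> omega
    · refine ⟨p, q, n - p - q - r, by omega, by omega, by omega, by omega, by omega, by omega,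
             by omega, ?_⟩
      have e : n - p - q - (n - p - q - r) = r := by ring
      rw [e]
      simp only [if_pos hp1, if_pos hq1, if_pos hr1]
      split_ifs <;> omega
    · refine ⟨p, q, r, by omega, by omega, by omega, by omega, by omega, by omega, by omega, ?_⟩
      simp only [if_pos hp1, if_pos hq1, if_pos hr1]
      split_ifs <;> omega
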